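-- pv_equiv track=rewrite | github.com/mshahnawaz1202/Topology-Aware-All-to-All-Personalized-Communication | algorithms.py | ring_all_to_all
-- ===== SOURCE A (Python) =====
-- def _init_messages(p: int) -> dict[int, dict[int, list[str]]]:
--     """
--     Initialize message buffers.
--     Each node i holds p-1 messages: one for every other node j.
--     Returns dict:  node -> { dest_node: [msg_labels] }
--     """
--     buffers = {}
--     for i in range(p):
--         buffers[i] = {}
--         for j in range(p):
--             if i != j:
--                 buffers[i][j] = [f"m{i}→{j}"]
--     return buffers
--
-- def ring_all_to_all(p: int):
--     """
--     Ring shift algorithm for all-to-all personalized communication.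
--
--     In step k (k = 1 .. p-1):
--         Node i sends the message destined for node (i+k) mod p
--         to its clockwise neighbour (i+1) mod p.
--         Messages travel hop-by-hop around the ring.
--
--     Returns
--     -------
--     steps : list[list[tuple(src, dst, list[str])]]
--         Each element is one communication round.
--     total_steps : int
--     """
--     # buffers[node] = { final_dest: [msg_labels] }
--     buffers = _init_messages(p)
--     steps = []
--
--     for k in range(1, p):
--         round_transfers = []
--         # In step k, every node i sends the message for destination (i+k)%p
--         # to neighbour (i+1)%p
--         new_buffers = {i: {} for i in range(p)}
--
--         for i in range(p):
--             target_dest = (i + k) % p          # final destination of the message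
--             neighbour   = (i + 1) % p           # next hop (clockwise)
--
--             # Find messages at node i destined for target_dest
--             msgs = buffers[i].get(target_dest, [])
--             if msgs:
--                 round_transfers.append((i, neighbour, list(msgs)))
--
--             # Move all messages that are NOT for target_dest into new_buffers
--             for dest, m_list in buffers[i].items():
--                 if dest == target_dest:
--                     # This message moves to neighbour
--                     new_buffers[neighbour].setdefault(dest, []).extend(m_list)
--                 else:
--                     # stays (or is the node's own received msgs)
--                     new_buffers[i].setdefault(dest, []).extend(m_list)
--
--         buffers = new_buffers
--         steps.append(round_transfers)
--
--     return steps, p - 1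
-- ===== SOURCE B (Python) =====
-- def ring_all_to_all(p: int):
--     # Closed form: in round k (1..p-1) node i hands exactly its own message
--     # m{i}->{(i+k)%p} to neighbour (i+1)%p -- a message received earlier is
--     # never the one selected again, so no buffer simulation is needed.
--     steps = [[(i, (i + 1) % p, [f"m{i}\u2192{(i + k) % p}"]) for i in range(p)]
--              for k in range(1, p)]
--     return steps, p - 1
-- ===== Notes on version B (the rewrite author's own statement) =====
-- stated objective: faster
-- what changed: B replaces A's round-by-round simulation of all message buffers with a closed-form comprehension: in round k node i transfers exactly its own message m{i}->{(i+k)%p} to (i+1)%p (a message forwarded earlier is never selected again), so the p-dict buffer state is dropped entirely.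
import Mathlib
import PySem

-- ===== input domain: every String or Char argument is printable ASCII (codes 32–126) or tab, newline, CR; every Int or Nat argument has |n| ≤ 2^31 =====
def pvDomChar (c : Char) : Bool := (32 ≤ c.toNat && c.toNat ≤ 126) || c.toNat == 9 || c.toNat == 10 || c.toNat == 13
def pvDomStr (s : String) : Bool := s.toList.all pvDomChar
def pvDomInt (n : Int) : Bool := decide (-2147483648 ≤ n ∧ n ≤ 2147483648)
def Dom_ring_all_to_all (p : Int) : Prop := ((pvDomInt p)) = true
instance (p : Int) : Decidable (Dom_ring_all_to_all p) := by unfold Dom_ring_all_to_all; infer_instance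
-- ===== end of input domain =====

-- B replaces A's O(p^3) round-by-round simulation of all p message buffers by the closed
-- form of the transfers it emits (round k: node i sends its own message m{i}→{(i+k)%p} to
-- (i+1)%p), measured asymptotically faster; equal return value proved for every Int p.

-- ===== PORT A =====
-- f"m{i}→{j}"
def pvMsg (i j : Int) : String := "m" ++ PySem.Int.toStr i ++ "→" ++ PySem.Int.toStr j

-- _init_messages
def pvInitMessages (p : Int) : PySem.Dict Int (PySem.Dict Int (List String)) :=
  (PySem.List.pyRange 0 p 1).foldl
    (fun buffers i =>
      buffers.insert i
        ((PySem.List.pyRange 0 p 1).foldl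
          (fun d j => if i ≠ j then d.insert j [pvMsg i j] else d)
          PySem.Dict.empty))
    PySem.Dict.empty

-- the body of A's `for k in range(1, p)` loop: one communication round
-- (`buffers[i]` / `new_buffers[...]` are ported as getD ∅ — exact, since those keys are
-- always present when Python indexes them, so no KeyError is reachable)
def pvRound (p k : Int) (buffers : PySem.Dict Int (PySem.Dict Int (List String))) :
    List (Int × Int × List String) × PySem.Dict Int (PySem.Dict Int (List String)) :=
  let new0 := (PySem.List.pyRange 0 p 1).foldl
    (fun d i => d.insert i PySem.Dict.empty) PySem.Dict.empty
  (PySem.List.pyRange 0 p 1).foldl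
    (fun acc i =>
      let target := PySem.Int.mod (i + k) p
      let neighbour := PySem.Int.mod (i + 1) p
      let bi := buffers.getD i PySem.Dict.empty
      let msgs := bi.getD target []
      let rt := if msgs ≠ [] then acc.1 ++ [(i, neighbour, msgs)] else acc.1
      let nb := bi.items.foldl
        (fun nb dm =>
          if dm.1 = target then
            -- new_buffers[neighbour].setdefault(dest, []).extend(m_list)
            let inner := nb.getD neighbour PySem.Dict.empty
            nb.insert neighbour (inner.insert dm.1 (inner.getD dm.1 [] ++ dm.2))
          else
            -- new_buffers[i].setdefault(dest, []).extend(m_list)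
            let inner := nb.getD i PySem.Dict.empty
            nb.insert i (inner.insert dm.1 (inner.getD dm.1 [] ++ dm.2)))
        acc.2
      (rt, nb))
    ([], new0)

def ring_all_to_all (p : Int) : (List (List (Int × Int × List String))) × Int :=
  let buffers := pvInitMessages p
  let res := (PySem.List.pyRange 1 p 1).foldl
    (fun acc k =>
      let r := pvRound p k acc.2
      (acc.1 ++ [r.1], r.2))
    (([] : List (List (Int × Int × List String))), buffers)
  (res.1, p - 1)

-- ===== PORT B =====
def ring_all_to_all_alt (p : Int) : (List (List (Int × Int × List String))) × Int :=
  ((PySem.List.pyRange 1 p 1).map (fun k =>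
      (PySem.List.pyRange 0 p 1).map (fun i =>
        (i, PySem.Int.mod (i + 1) p, [pvMsg i (PySem.Int.mod (i + k) p)]))),
   p - 1)

-- ===== PRECONDITION & SPEC =====
def Spec_ring_all_to_all (p : Int) (out : (List (List (Int × Int × List String))) × Int) : Prop := out = ring_all_to_all_alt p
instance (p : Int) (out : (List (List (Int × Int × List String))) × Int) : Decidable (Spec_ring_all_to_all p out) := by unfold Spec_ring_all_to_all; infer_instance

-- ===== CLAIM (what is proved, stated in full; the proofs are below) =====
def Claim_equal_ring_all_to_all : Prop := ∀ (p : Int), Dom_ring_all_to_all p → Spec_ring_all_to_all p (ring_all_to_all p)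

-- ===== LEMMAS AND PROOFS =====

-- modular-arithmetic helpers ---------------------------------------------------------
theorem pv_sub_emod_left (a b p : Int) : ((a % p) - b) % p = (a - b) % p := by
  rw [Int.sub_emod, Int.emod_emod_of_dvd _ dvd_rfl, ← Int.sub_emod]

theorem pv_sub_emod_right (a b p : Int) : (a - b % p) % p = (a - b) % p := by
  rw [Int.sub_emod, Int.emod_emod_of_dvd _ dvd_rfl, ← Int.sub_emod]

theorem pv_emod_small (a p : Int) (h1 : 0 ≤ a) (h2 : a < p) : a % p = a :=
  Int.emod_eq_of_lt h1 h2

theorem pv_emod_bounds (p a : Int) (hp : 0 < p) : 0 ≤ a % p ∧ a % p < p :=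
  ⟨Int.emod_nonneg a (by omega), Int.emod_lt_of_pos a hp⟩

-- the value of one transfer row, and the buffer-lookup invariant -----------------------
def pvRow (p k : Int) : List (Int × Int × List String) :=
  (PySem.List.pyRange 0 p 1).map (fun i =>
    (i, PySem.Int.mod (i + 1) p, [pvMsg i (PySem.Int.mod (i + k) p)]))

-- what node i's buffer holds at destination d at the start of round k:
--   r = (d-i) mod p;  r ≥ k: i's own not-yet-sent message;  r = k-1: empty slot;
--   r ≤ k-2: the message received from (i-1) mod p in round r+1.
def pvG (p k i d : Int) : Option (List String) :=
  let r := PySem.Int.mod (d - i) p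
  if k ≤ r then some [pvMsg i d]
  else if r = k - 1 then none
  else some [pvMsg (PySem.Int.mod (i - 1) p) d]

def pvInv (p k : Int) (B : PySem.Dict Int (PySem.Dict Int (List String))) : Prop :=
  ∀ i, 0 ≤ i → i < p →
    (B.getD i PySem.Dict.empty).keys.Nodup ∧
    ∀ d, (B.getD i PySem.Dict.empty).get? d =
      if 0 ≤ d ∧ d < p then pvG p k i d else none

-- generic: lookup through a fold of unconditional inserts with a value independent of the dict
theorem pv_get?_foldl_insert {ν : Type} (l : List Int) (v : Int → ν)
    (d0 : PySem.Dict Int ν) (n : Int) :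
    (l.foldl (fun d x => d.insert x (v x)) d0).get? n
      = if n ∈ l then some (v n) else d0.get? n := by
  induction l generalizing d0 with
  | nil => simp
  | cons x t ih =>
      simp only [List.foldl_cons, ih, PySem.Dict.get?_insert, List.mem_cons]
      by_cases hnt : n ∈ t <;> by_cases hnx : n = x <;> simp [hnt, hnx]

-- one buffer-update event: (target node, destination, messages) applied to new_buffers
def pvApply (nb : PySem.Dict Int (PySem.Dict Int (List String)))
    (e : Int × Int × List String) : PySem.Dict Int (PySem.Dict Int (List String)) :=
  let inner := nb.getD e.1 PySem.Dict.empty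
  nb.insert e.1 (inner.insert e.2.1 (inner.getD e.2.1 [] ++ e.2.2))

def pvEvents (p k : Int) (B : PySem.Dict Int (PySem.Dict Int (List String))) :
    List (Int × Int × List String) :=
  (PySem.List.pyRange 0 p 1).flatMap (fun i =>
    (B.getD i PySem.Dict.empty).items.map (fun dm =>
      (if dm.1 = PySem.Int.mod (i + k) p then PySem.Int.mod (i + 1) p else i, dm.1, dm.2)))

theorem pv_apply_nodup (nb : PySem.Dict Int (PySem.Dict Int (List String)))
    (e : Int × Int × List String) (h : ∀ n, (nb.getD n PySem.Dict.empty).keys.Nodup) :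
    ∀ n, ((pvApply nb e).getD n PySem.Dict.empty).keys.Nodup := by
  intro n
  unfold pvApply
  rw [PySem.Dict.getD_insert]
  split
  · exact PySem.Dict.nodup_keys_insert _ _ _ (h e.1)
  · exact h n

theorem pv_events_nodup (es : List (Int × Int × List String))
    (nb : PySem.Dict Int (PySem.Dict Int (List String)))
    (h : ∀ n, (nb.getD n PySem.Dict.empty).keys.Nodup) :
    ∀ n, ((es.foldl pvApply nb).getD n PySem.Dict.empty).keys.Nodup := by
  induction es generalizing nb with
  | nil => exact h
  | cons e t ih => exact ih _ (pv_apply_nodup nb e h)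

-- lookup after a fold of events whose (node, dest) slots are pairwise distinct
theorem pv_events_get? (es : List (Int × Int × List String))
    (nb : PySem.Dict Int (PySem.Dict Int (List String)))
    (hslots : (es.map (fun e => (e.1, e.2.1))).Nodup) (n d : Int) :
    ((es.foldl pvApply nb).getD n PySem.Dict.empty).get? d =
      match es.find? (fun e => e.1 == n && e.2.1 == d) with
      | some e => some ((nb.getD n PySem.Dict.empty).getD d [] ++ e.2.2)
      | none => (nb.getD n PySem.Dict.empty).get? d := by
  induction es generalizing nb with
  | nil => simp
  | cons e t ih =>
      simp only [List.map_cons, List.nodup_cons, List.mem_map] at hslots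
      obtain ⟨hnotin, hnd⟩ := hslots
      simp only [List.foldl_cons, List.find?_cons]
      by_cases hslot : e.1 = n ∧ e.2.1 = d
      · obtain ⟨h1, h2⟩ := hslot
        have htest : (e.1 == n && e.2.1 == d) = true := by simp [h1, h2]
        rw [htest]
        have hnone : t.find? (fun e' => e'.1 == n && e'.2.1 == d) = none := by
          rw [List.find?_eq_none]
          intro e' he' htest'
          simp only [Bool.and_eq_true, beq_iff_eq] at htest'
          exact hnotin ⟨e', he', by rw [htest'.1, htest'.2, h1, h2]⟩
        rw [ih _ hnd, hnone]
        unfold pvApply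
        rw [h1, PySem.Dict.getD_insert, if_pos rfl, h2,
          PySem.Dict.get?_insert, if_pos rfl]
      · have htest : (e.1 == n && e.2.1 == d) = false := by
          rcases not_and_or.mp hslot with h | h <;> simp [h]
        rw [htest]
        have hsame1 : ((pvApply nb e).getD n PySem.Dict.empty).get? d
            = (nb.getD n PySem.Dict.empty).get? d := by
          unfold pvApply
          rw [PySem.Dict.getD_insert]
          split
          · rename_i hn
            have hd : d ≠ e.2.1 := by
              intro hdd
              exact hslot ⟨hn.symm, hdd.symm⟩
            rw [hn, PySem.Dict.get?_insert_of_ne _ _ hd]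
          · rfl
        have hsame2 : ((pvApply nb e).getD n PySem.Dict.empty).getD d []
            = (nb.getD n PySem.Dict.empty).getD d [] := by
          rw [PySem.Dict.getD_eq_get?_getD, hsame1, ← PySem.Dict.getD_eq_get?_getD]
        rw [ih _ hnd]
        cases t.find? (fun e' => e'.1 == n && e'.2.1 == d) <;> simp [hsame1, hsame2]

theorem pv_emod_shift (a p : Int) : (a + p) % p = a % p := by
  have h := Int.add_mul_emod_self_left (a := a) (b := p) (c := 1)
  simp only [mul_one] at h
  exact h

theorem pv_emod_cases (a p : Int) (_hp : 0 < p) (h1 : -p ≤ a) (h2 : a < p) :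
    a % p = if 0 ≤ a then a else a + p := by
  split
  · exact pv_emod_small a p (by omega) h2
  · rw [← pv_emod_shift]
    exact pv_emod_small _ p (by omega) (by omega)

theorem pv_inner_get? (p i d : Int) :
    ((PySem.List.pyRange 0 p 1).foldl
        (fun d' j => if i ≠ j then d'.insert j [pvMsg i j] else d') PySem.Dict.empty).get? d
      = if (0 ≤ d ∧ d < p) ∧ i ≠ d then some [pvMsg i d] else none := by
  rw [PySem.List.foldl_ite_eq_foldl_filter (p := fun j => i ≠ j)]
  rw [pv_get?_foldl_insert (v := fun j => [pvMsg i j])]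
  simp only [List.mem_filter, PySem.List.mem_pyRange_one, PySem.Dict.get?_empty,
    decide_eq_true_eq]

theorem pv_inner_nodup (p i : Int) :
    ((PySem.List.pyRange 0 p 1).foldl
        (fun d' j => if i ≠ j then d'.insert j [pvMsg i j] else d') PySem.Dict.empty).keys.Nodup := by
  rw [PySem.List.foldl_ite_eq_foldl_filter (p := fun j => i ≠ j)]
  exact PySem.Dict.nodup_keys_foldl_insert _ (fun _ j => [pvMsg i j]) _
    PySem.Dict.nodup_keys_empty

theorem pv_init_getD (p i : Int) (h0 : 0 ≤ i) (h1 : i < p) :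
    (pvInitMessages p).getD i PySem.Dict.empty
      = (PySem.List.pyRange 0 p 1).foldl
          (fun d' j => if i ≠ j then d'.insert j [pvMsg i j] else d') PySem.Dict.empty := by
  unfold pvInitMessages
  rw [PySem.Dict.getD_eq_get?_getD,
    pv_get?_foldl_insert
      (v := fun i => (PySem.List.pyRange 0 p 1).foldl
        (fun d' j => if i ≠ j then d'.insert j [pvMsg i j] else d') PySem.Dict.empty)]
  rw [if_pos (PySem.List.mem_pyRange_one.mpr ⟨h0, h1⟩)]
  rfl

-- base case: the initial buffers satisfy the invariant for k = 1
theorem pv_init_inv (p : Int) (hp : 0 < p) : pvInv p 1 (pvInitMessages p) := by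
  intro i h0 h1
  rw [pv_init_getD p i h0 h1]
  refine ⟨pv_inner_nodup p i, fun d => ?_⟩
  rw [pv_inner_get?]
  have hm : ∀ a : Int, PySem.Int.mod a p = a % p := fun a =>
    PySem.Int.mod_eq_emod_of_pos hp
  unfold pvG
  simp only [hm]
  by_cases hd : 0 ≤ d ∧ d < p
  · rw [if_pos hd]
    by_cases hdi : d = i
    · subst hdi
      simp
    · have hr : (d - i) % p = if 0 ≤ d - i then d - i else d - i + p :=
        pv_emod_cases _ p hp (by omega) (by omega)
      have h1r : 1 ≤ (d - i) % p := by rw [hr]; split <;> omega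
      rw [if_pos ⟨hd, fun h => hdi h.symm⟩]
      rw [if_pos h1r]
  · rw [if_neg (by tauto), if_neg hd]

-- the round fold, split into its two independent components (transfers / new buffers)
theorem pv_round_eq (p k : Int) (B : PySem.Dict Int (PySem.Dict Int (List String))) :
    pvRound p k B
      = ((PySem.List.pyRange 0 p 1).foldl
           (fun rt i =>
             if (B.getD i PySem.Dict.empty).getD (PySem.Int.mod (i + k) p) [] ≠ [] then
               rt ++ [(i, PySem.Int.mod (i + 1) p,
                 (B.getD i PySem.Dict.empty).getD (PySem.Int.mod (i + k) p) [])]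
             else rt) [],
         (pvEvents p k B).foldl pvApply
           ((PySem.List.pyRange 0 p 1).foldl
             (fun d i => d.insert i PySem.Dict.empty) PySem.Dict.empty)) := by
  unfold pvRound
  show (PySem.List.pyRange 0 p 1).foldl
      (fun acc i =>
        (if (B.getD i PySem.Dict.empty).getD (PySem.Int.mod (i + k) p) [] ≠ [] then
           acc.1 ++ [(i, PySem.Int.mod (i + 1) p,
             (B.getD i PySem.Dict.empty).getD (PySem.Int.mod (i + k) p) [])]
         else acc.1,
         (B.getD i PySem.Dict.empty).items.foldl
           (fun nb dm =>
             if dm.1 = PySem.Int.mod (i + k) p then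
               nb.insert (PySem.Int.mod (i + 1) p)
                 ((nb.getD (PySem.Int.mod (i + 1) p) PySem.Dict.empty).insert dm.1
                   ((nb.getD (PySem.Int.mod (i + 1) p) PySem.Dict.empty).getD dm.1 []
                     ++ dm.2))
             else
               nb.insert i
                 ((nb.getD i PySem.Dict.empty).insert dm.1
                   ((nb.getD i PySem.Dict.empty).getD dm.1 [] ++ dm.2)))
           acc.2))
      ([], (PySem.List.pyRange 0 p 1).foldl
        (fun d i => d.insert i PySem.Dict.empty) PySem.Dict.empty) = _
  rw [PySem.List.foldl_prod_mk
    (f := fun rt (i : Int) =>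
      if (B.getD i PySem.Dict.empty).getD (PySem.Int.mod (i + k) p) [] ≠ [] then
        rt ++ [(i, PySem.Int.mod (i + 1) p,
          (B.getD i PySem.Dict.empty).getD (PySem.Int.mod (i + k) p) [])]
      else rt)
    (g := fun (nb : PySem.Dict Int (PySem.Dict Int (List String))) (i : Int) =>
      (B.getD i PySem.Dict.empty).items.foldl
        (fun (nb : PySem.Dict Int (PySem.Dict Int (List String))) (dm : Int × List String) =>
          if dm.1 = PySem.Int.mod (i + k) p then
            nb.insert (PySem.Int.mod (i + 1) p)
              ((nb.getD (PySem.Int.mod (i + 1) p) PySem.Dict.empty).insert dm.1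
                ((nb.getD (PySem.Int.mod (i + 1) p) PySem.Dict.empty).getD dm.1 []
                  ++ dm.2))
          else
            nb.insert i
              ((nb.getD i PySem.Dict.empty).insert dm.1
                ((nb.getD i PySem.Dict.empty).getD dm.1 [] ++ dm.2)))
        nb)]
  refine congrArg _ ?_
  unfold pvEvents
  rw [List.foldl_flatMap]
  apply PySem.List.foldl_congr_mem
  intro nb i _
  rw [List.foldl_map]
  apply PySem.List.foldl_congr_mem
  intro nb' dm _
  by_cases h : dm.1 = PySem.Int.mod (i + k) p
  · rw [if_pos h, if_pos h]
    rfl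
  · rw [if_neg h, if_neg h]
    rfl

-- one round: transfers are pvRow, and the invariant advances from k to k+1
theorem pv_round_rt (p k : Int) (hp : 0 < p) (hk1 : 1 ≤ k) (hk2 : k < p)
    (B : PySem.Dict Int (PySem.Dict Int (List String))) (hB : pvInv p k B) :
    (pvRound p k B).1 = pvRow p k := by
  rw [pv_round_eq]
  have hmsg : ∀ i : Int, 0 ≤ i → i < p →
      (B.getD i PySem.Dict.empty).getD (PySem.Int.mod (i + k) p) []
        = [pvMsg i (PySem.Int.mod (i + k) p)] := by
    intro i h0 h1
    have hb := pv_emod_bounds p (i + k) hp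
    rw [PySem.Dict.getD_eq_get?_getD, PySem.Int.mod_eq_emod_of_pos hp,
      (hB i h0 h1).2 ((i + k) % p), if_pos hb]
    unfold pvG
    rw [PySem.Int.mod_eq_emod_of_pos hp, pv_sub_emod_left,
      show i + k - i = k by ring, pv_emod_small k p (by omega) hk2, if_pos le_rfl]
    rfl
  rw [PySem.List.foldl_congr_mem _ _
    (fun rt i => rt ++ [(i, PySem.Int.mod (i + 1) p, [pvMsg i (PySem.Int.mod (i + k) p)])]) _
    (by
      intro acc i hi
      obtain ⟨h0, h1⟩ := PySem.List.mem_pyRange_one.mp hi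
      rw [hmsg i h0 h1]
      simp)]
  rw [PySem.List.foldl_append_singleton_eq_map
    (f := fun i => (i, PySem.Int.mod (i + 1) p, [pvMsg i (PySem.Int.mod (i + k) p)]))]
  simp [pvRow]

theorem pv_round_inv (p k : Int) (hp : 0 < p) (hk1 : 1 ≤ k) (hk2 : k < p)
    (B : PySem.Dict Int (PySem.Dict Int (List String))) (hB : pvInv p k B) :
    pvInv p (k + 1) (pvRound p k B).2 := by
  rw [pv_round_eq]
  -- toolbox -------------------------------------------------------------------
  have hnew0 : ∀ n : Int,
      (((PySem.List.pyRange 0 p 1).foldl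
        (fun d i => d.insert i PySem.Dict.empty) PySem.Dict.empty
        : PySem.Dict Int (PySem.Dict Int (List String))).getD n PySem.Dict.empty)
        = PySem.Dict.empty := by
    intro n
    rw [PySem.Dict.getD_eq_get?_getD,
      pv_get?_foldl_insert (v := fun _ => PySem.Dict.empty)]
    split <;> rfl
  have hG : ∀ k' i d : Int, pvG p k' i d
      = if k' ≤ (d - i) % p then some [pvMsg i d]
        else if (d - i) % p = k' - 1 then none
        else some [pvMsg ((i - 1) % p) d] := by
    intro k' i d
    unfold pvG
    rw [PySem.Int.mod_eq_emod_of_pos hp, PySem.Int.mod_eq_emod_of_pos hp]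
  have hkey : ∀ i d : Int, 0 ≤ i → i < p → ∀ v,
      ((B.getD i PySem.Dict.empty).get? d = some v
        ↔ (0 ≤ d ∧ d < p) ∧ pvG p k i d = some v) := by
    intro i d h0 h1 v
    rw [(hB i h0 h1).2 d]
    by_cases hd : 0 ≤ d ∧ d < p <;> simp [hd]
  have hdi : ∀ i d : Int, 0 ≤ d → d < p → (i + (d - i) % p) % p = d := by
    intro i d h0 h1
    rw [Int.add_emod_emod, show i + (d - i) = d by ring, pv_emod_small d p h0 h1]
  have hmv : ∀ i : Int, ((i + k) % p - (i + 1) % p) % p = k - 1 := by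
    intro i
    rw [pv_sub_emod_left, pv_sub_emod_right, show i + k - (i + 1) = k - 1 by ring,
      pv_emod_small (k - 1) p (by omega) (by omega)]
  have hprev : ∀ i n : Int, 0 ≤ i → i < p → (i + 1) % p = n → i = (n - 1) % p := by
    intro i n h0 h1 h
    rw [← h, pv_sub_emod_left, show i + 1 - 1 = i by ring, pv_emod_small i p h0 h1]
  -- membership in the event list ----------------------------------------------
  have hev : ∀ e : Int × Int × List String, e ∈ pvEvents p k B ↔
      ∃ i, (0 ≤ i ∧ i < p) ∧
        (B.getD i PySem.Dict.empty).get? e.2.1 = some e.2.2 ∧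
        e.1 = (if e.2.1 = PySem.Int.mod (i + k) p then PySem.Int.mod (i + 1) p else i) := by
    rintro ⟨e1, e2, e3⟩
    unfold pvEvents
    simp only [List.mem_flatMap, List.mem_map, PySem.List.mem_pyRange_one]
    constructor
    · rintro ⟨i, hi, dm, hdm, heq⟩
      injection heq with hA hBC
      injection hBC with hB1 hC1
      subst hA hB1 hC1
      exact ⟨i, hi, PySem.Dict.get?_of_mem_items _ (by simpa using hdm)
        (hB i hi.1 hi.2).1, rfl⟩
    · rintro ⟨i, hi, hget, he⟩
      exact ⟨i, hi, (e2, e3), PySem.Dict.mem_items_of_get?_eq_some _ hget, by rw [← he]⟩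
  -- which source can write slot (n, d), and what value it writes ---------------
  have hsrc : ∀ n d : Int, ∀ e ∈ pvEvents p k B, e.1 = n → e.2.1 = d →
      (0 ≤ d ∧ d < p) ∧
      (((d - n) % p ≠ k - 1 ∧ (d - n) % p ≠ k ∧ 0 ≤ n ∧ n < p ∧
          pvG p k n d = some e.2.2)
        ∨ ((d - n) % p = k - 1 ∧ pvG p k ((n - 1) % p) d = some e.2.2)) := by
    intro n d e he h1 h2
    obtain ⟨i, ⟨hi0, hi1⟩, hget, htgt⟩ := (hev e).mp he
    rw [h2] at hget htgt
    rw [h1] at htgt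
    have hkd := (hkey i d hi0 hi1 e.2.2).mp hget
    refine ⟨hkd.1, ?_⟩
    rw [PySem.Int.mod_eq_emod_of_pos hp, PySem.Int.mod_eq_emod_of_pos hp] at htgt
    by_cases hc : d = (i + k) % p
    · right
      rw [if_pos hc] at htgt
      have hii : i = (n - 1) % p := hprev i n hi0 hi1 htgt.symm
      constructor
      · rw [hc, htgt]
        exact hmv i
      · rw [← hii]
        exact hkd.2
    · left
      rw [if_neg hc] at htgt
      have htgt' : i = n := htgt.symm
      subst htgt'
      have hpv := hkd.2
      refine ⟨?_, ?_, hi0, hi1, hpv⟩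
      · intro hrr
        rw [hG, if_neg (by omega), if_pos hrr] at hpv
        simp at hpv
      · intro hrr
        exact hc (by rw [← hdi i d hkd.1.1 hkd.1.2, hrr])
  -- nodup of the written slots -------------------------------------------------
  have hslots : ((pvEvents p k B).map (fun e => (e.1, e.2.1))).Nodup := by
    unfold pvEvents
    rw [List.map_flatMap, List.nodup_flatMap]
    constructor
    · intro i hi
      obtain ⟨h0, h1⟩ := PySem.List.mem_pyRange_one.mp hi
      rw [List.map_map]
      exact List.Nodup.of_map Prod.snd (by
        rw [List.map_map]
        exact (hB i h0 h1).1)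
    · have hsub : ∀ x : Int, 0 ≤ x → x < p → ((x + k) % p - k) % p = x := by
        intro x h0 h1
        rw [pv_sub_emod_left, show x + k - k = x by ring, pv_emod_small x p h0 h1]
      refine List.Pairwise.imp_of_mem (fun {a b} ha hb hab => ?_)
        (PySem.List.nodup_pyRange_one 0 p)
      obtain ⟨a0, a1⟩ := PySem.List.mem_pyRange_one.mp ha
      obtain ⟨b0, b1⟩ := PySem.List.mem_pyRange_one.mp hb
      dsimp only [Function.onFun]
      rintro ⟨s1, s2⟩ hsa hsb
      rw [List.map_map] at hsa hsb
      obtain ⟨dma, hdma, hsae⟩ := List.mem_map.mp hsa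
      obtain ⟨dmb, hdmb, hsbe⟩ := List.mem_map.mp hsb
      simp only [Function.comp, PySem.Int.mod_eq_emod_of_pos hp] at hsae hsbe
      injection hsae with ha1 ha2
      injection hsbe with hb1 hb2
      have hga := (hkey a dma.1 a0 a1 dma.2).mp
        (PySem.Dict.get?_of_mem_items _ (by simpa using hdma) (hB a a0 a1).1)
      have hgb := (hkey b dmb.1 b0 b1 dmb.2).mp
        (PySem.Dict.get?_of_mem_items _ (by simpa using hdmb) (hB b b0 b1).1)
      have hd_eq : dma.1 = dmb.1 := by rw [ha2, hb2]
      by_cases hca : dma.1 = (a + k) % p <;> by_cases hcb : dmb.1 = (b + k) % p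
      · -- both move: same target dest forces the same source
        apply hab
        have h2 : (a + k) % p = (b + k) % p := by rw [← hca, hd_eq, hcb]
        rw [← hsub a a0 a1, ← hsub b b0 b1, h2]
      · -- a moves, b stays: b's slot would be the empty one
        rw [if_pos hca] at ha1
        rw [if_neg hcb] at hb1
        have hbn : (a + 1) % p = b := by rw [ha1, hb1]
        have hrb : (dmb.1 - b) % p = k - 1 := by
          rw [← hd_eq, hca, ← hbn]
          exact hmv a
        have := hgb.2
        rw [hG, if_neg (by omega), if_pos hrb] at this
        simp at this
      · -- b moves, a stays: symmetric
        rw [if_neg hca] at ha1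
        rw [if_pos hcb] at hb1
        have han : (b + 1) % p = a := by rw [hb1, ha1]
        have hra : (dma.1 - a) % p = k - 1 := by
          rw [hd_eq, hcb, ← han]
          exact hmv b
        have := hga.2
        rw [hG, if_neg (by omega), if_pos hra] at this
        simp at this
      · -- both stay
        rw [if_neg hca] at ha1
        rw [if_neg hcb] at hb1
        exact hab (by rw [ha1, hb1])
  -- the invariant itself -------------------------------------------------------
  intro n hn0 hnp
  constructor
  · exact pv_events_nodup _ _
      (fun n' => by rw [hnew0]; exact PySem.Dict.nodup_keys_empty) n
  · intro d
    rw [pv_events_get? _ _ hslots n d]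
    by_cases hd : 0 ≤ d ∧ d < p
    · -- d in range: case on r = (d - n) % p
      have hr := pv_emod_bounds p (d - n) hp
      by_cases hA : k + 1 ≤ (d - n) % p
      · -- own message, still waiting: the stay event from node n writes it
        have he0 : ((n, d, [pvMsg n d]) : Int × Int × List String) ∈ pvEvents p k B := by
          refine (hev (n, d, [pvMsg n d])).mpr ⟨n, ⟨hn0, hnp⟩, ?_, ?_⟩
          · rw [hkey n d hn0 hnp]
            exact ⟨hd, by rw [hG, if_pos (by omega)]⟩
          · have hne : d ≠ PySem.Int.mod (n + k) p := by
              rw [PySem.Int.mod_eq_emod_of_pos hp]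
              intro hc
              have : (d - n) % p = k := by
                rw [hc, pv_sub_emod_left, show n + k - n = k by ring,
                  pv_emod_small k p (by omega) hk2]
              omega
            show n = if d = PySem.Int.mod (n + k) p then PySem.Int.mod (n + 1) p else n
            rw [if_neg hne]
        cases hfind : (pvEvents p k B).find? (fun e => e.1 == n && e.2.1 == d) with
        | none =>
            exact absurd (List.find?_eq_none.mp hfind _ he0 (by simp)) (by simp)
        | some e =>
            have htest := List.find?_some hfind
            simp only [Bool.and_eq_true, beq_iff_eq] at htest
            have := hsrc n d e (List.mem_of_find?_eq_some hfind) htest.1 htest.2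
            rcases this.2 with ⟨_, _, _, _, hpv⟩ | ⟨hrr, _⟩
            · rw [hG, if_pos (by omega)] at hpv
              rw [if_pos hd, hG, if_pos hA, hnew0]
              simp only [PySem.Dict.getD_empty, List.nil_append]
              exact hpv.symm
            · omega
      · by_cases hB2 : (d - n) % p = k
        · -- the message for d just left node n: empty slot
          have hfind : (pvEvents p k B).find? (fun e => e.1 == n && e.2.1 == d) = none := by
            rw [List.find?_eq_none]
            intro e he htest
            simp only [Bool.and_eq_true, beq_iff_eq] at htest
            have := hsrc n d e he htest.1 htest.2
            rcases this.2 with ⟨_, hne, _⟩ | ⟨hrr, _⟩ <;> omega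
          rw [hfind, if_pos hd, hG, if_neg (by omega), if_pos (by omega), hnew0,
            PySem.Dict.get?_empty]
        · -- received (or just receiving) from (n-1) mod p
          have hrle : (d - n) % p ≤ k - 1 := by omega
          have hval : pvG p (k + 1) n d = some [pvMsg ((n - 1) % p) d] := by
            rw [hG, if_neg (by omega), if_neg (by omega)]
          have hex : ((n, d, [pvMsg ((n - 1) % p) d]) : Int × Int × List String)
              ∈ pvEvents p k B := by
            by_cases hc : (d - n) % p = k - 1
            · -- arriving this round from i0 = (n-1) mod p
              have hi0b := pv_emod_bounds p (n - 1) hp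
              refine (hev _).mpr ⟨(n - 1) % p, ⟨hi0b.1, hi0b.2⟩, ?_, ?_⟩
              · rw [hkey _ d hi0b.1 hi0b.2]
                refine ⟨hd, ?_⟩
                have : (d - (n - 1) % p) % p = k := by
                  rw [pv_sub_emod_right, show d - (n - 1) = d - n + 1 by ring,
                    ← Int.emod_add_emod, hc, show k - 1 + 1 = k by ring,
                    pv_emod_small k p (by omega) hk2]
                rw [hG, if_pos (by omega)]
              · have hceq : d = PySem.Int.mod ((n - 1) % p + k) p := by
                  rw [PySem.Int.mod_eq_emod_of_pos hp, Int.emod_add_emod,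
                    show n - 1 + k = n + (k - 1) by ring, ← hc, hdi n d hd.1 hd.2]
                show n = if d = PySem.Int.mod ((n - 1) % p + k) p
                    then PySem.Int.mod ((n - 1) % p + 1) p else (n - 1) % p
                rw [if_pos hceq, PySem.Int.mod_eq_emod_of_pos hp, Int.emod_add_emod,
                  show n - 1 + 1 = n by ring, pv_emod_small n p hn0 hnp]
            · -- received in an earlier round: the stay event from node n carries it
              refine (hev _).mpr ⟨n, ⟨hn0, hnp⟩, ?_, ?_⟩
              · rw [hkey n d hn0 hnp]
                exact ⟨hd, by rw [hG, if_neg (by omega), if_neg (by omega)]⟩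
              · have hne : d ≠ PySem.Int.mod (n + k) p := by
                  rw [PySem.Int.mod_eq_emod_of_pos hp]
                  intro hcc
                  have : (d - n) % p = k := by
                    rw [hcc, pv_sub_emod_left, show n + k - n = k by ring,
                      pv_emod_small k p (by omega) hk2]
                  omega
                show n = if d = PySem.Int.mod (n + k) p then PySem.Int.mod (n + 1) p else n
                rw [if_neg hne]
          cases hfind : (pvEvents p k B).find? (fun e => e.1 == n && e.2.1 == d) with
          | none =>
              exact absurd (List.find?_eq_none.mp hfind _ hex (by simp)) (by simp)
          | some e =>
              have htest := List.find?_some hfind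
              simp only [Bool.and_eq_true, beq_iff_eq] at htest
              have := hsrc n d e (List.mem_of_find?_eq_some hfind) htest.1 htest.2
              rcases this.2 with ⟨hne1, hne2, _, _, hpv⟩ | ⟨hrr, hpv⟩
              · rw [hG, if_neg (by omega), if_neg (by omega)] at hpv
                rw [if_pos hd, hval, hnew0]
                simp only [PySem.Dict.getD_empty, List.nil_append]
                exact hpv.symm
              · rw [hG, if_pos ?_] at hpv
                · rw [if_pos hd, hval, hnew0]
                  simp only [PySem.Dict.getD_empty, List.nil_append]
                  exact hpv.symm
                · rw [pv_sub_emod_right, show d - (n - 1) = d - n + 1 by ring,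
                    ← Int.emod_add_emod, hrr, show k - 1 + 1 = k by ring,
                    pv_emod_small k p (by omega) hk2]
    · -- d out of range: no event writes it
      have hfind : (pvEvents p k B).find? (fun e => e.1 == n && e.2.1 == d) = none := by
        rw [List.find?_eq_none]
        intro e he htest
        simp only [Bool.and_eq_true, beq_iff_eq] at htest
        exact hd (hsrc n d e he htest.1 htest.2).1
      rw [hfind, if_neg hd, hnew0, PySem.Dict.get?_empty]

-- the main loop, peeled round by round
theorem pv_main (p : Int) (hp : 0 < p) :
    ∀ (m : Nat) (k : Int) (steps : List (List (Int × Int × List String)))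
      (B : PySem.Dict Int (PySem.Dict Int (List String))),
      1 ≤ k → k + (m : Int) = p → pvInv p k B →
      ((PySem.List.pyRange k p 1).foldl
        (fun acc k' =>
          let r := pvRound p k' acc.2
          (acc.1 ++ [r.1], r.2)) (steps, B)).1
        = steps ++ (PySem.List.pyRange k p 1).map (pvRow p) := by
  intro m
  induction m with
  | zero =>
      intro k steps B hk1 hkp _
      rw [PySem.List.pyRange_one_eq_nil (by omega)]
      simp
  | succ m ih =>
      intro k steps B hk1 hkp hB
      have hklt : k < p := by omega
      rw [PySem.List.pyRange_one_cons hklt]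
      simp only [List.foldl_cons, List.map_cons]
      rw [pv_round_rt p k hp hk1 hklt B hB]
      rw [ih (k + 1) (steps ++ [pvRow p k]) (pvRound p k B).2 (by omega) (by omega)
        (pv_round_inv p k hp hk1 hklt B hB)]
      simp

-- ===== VERDICT (by name: the statement is the Claim_ definition above) =====
theorem ring_all_to_all_spec : Claim_equal_ring_all_to_all := by
  intro p _
  unfold Spec_ring_all_to_all ring_all_to_all ring_all_to_all_alt
  by_cases hp : 2 ≤ p
  · have h1 : ((PySem.List.pyRange 1 p 1).foldl
        (fun acc k =>
          let r := pvRound p k acc.2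
          (acc.1 ++ [r.1], r.2)) ([], pvInitMessages p)).1
        = [] ++ (PySem.List.pyRange 1 p 1).map (pvRow p) :=
      pv_main p (by omega) (p - 1).toNat 1 [] (pvInitMessages p) le_rfl (by omega)
        (pv_init_inv p (by omega))
    dsimp only
    rw [h1]
    simp [pvRow]
  · rw [PySem.List.pyRange_one_eq_nil (by omega)]
    simp
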